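-- pv_equiv track=rewrite | github.com/ps23456/Agentic-RAG-System | indexing/page_tree.py | _apply_offset_and_compute_ranges
-- ===== SOURCE A (Python) =====
-- from typing import Any, Callable, List, Optional
--
-- def _apply_offset_and_compute_ranges(toc_items: List[dict], offset: int, total_pages: int) -> List[dict]:
--     """Apply page offset and compute start_index/end_index for each item."""
--     for item in toc_items:
--         if item.get("page") is not None:
--             item["physical_index"] = item["page"] + offset
--         else:
--             item["physical_index"] = None
--
--     # Forward-fill None physical indices
--     last_valid = 1
--     for item in toc_items:
--         if item["physical_index"] is not None and item["physical_index"] >= 1: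
--             last_valid = item["physical_index"]
--         else:
--             item["physical_index"] = last_valid
--
--     # Compute start_index and end_index
--     for i, item in enumerate(toc_items):
--         item["start_index"] = item["physical_index"]
--         # end_index = next item's start - 1 (or total_pages)
--         next_start = total_pages
--         for j in range(i + 1, len(toc_items)):
--             ns = toc_items[j].get("physical_index")
--             if ns and ns > item["start_index"]:
--                 next_start = ns - 1
--                 break
--         item["end_index"] = min(next_start, total_pages)
--         if item["end_index"] < item["start_index"]:
--             item["end_index"] = item["start_index"]
--
--     return toc_items
-- ===== SOURCE B (Python) =====
-- def _apply_offset_and_compute_ranges(toc_items, offset, total_pages):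
--     # One forward pass: offset + forward-fill of physical indices.
--     phys = []
--     last = 1
--     for item in toc_items:
--         page = item.get("page")
--         p = page + offset if page is not None else None
--         if p is None or p < 1:
--             p = last
--         else:
--             last = p
--         phys.append(p)
--     # One backward pass: next strictly greater physical index via a monotonic stack.
--     n = len(phys)
--     ends = [0] * n
--     stack = []  # values of a strictly increasing chain, smallest on top
--     for i in range(n - 1, -1, -1):
--         p = phys[i]
--         while stack and stack[-1] <= p:
--             stack.pop()
--         e = min(stack[-1] - 1 if stack else total_pages, total_pages)
--         if e < p:
--             e = p
--         ends[i] = e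
--         stack.append(p)
--     for item, p, e in zip(toc_items, phys, ends):
--         item["physical_index"] = p
--         item["start_index"] = p
--         item["end_index"] = e
--     return toc_items
-- ===== Notes on version B (the rewrite author's own statement) =====
-- stated objective: alternative
-- what changed: A's three passes with a per-item forward scan for the next greater physical index (worst-case quadratic) are replaced by one forward offset-and-fill pass plus one backward monotonic-stack next-greater-element pass, then a single zip writing the three keys; on random inputs A's scan exits early so a timing run read only ~1.3x, hence no speed claim.
import Mathlib
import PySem

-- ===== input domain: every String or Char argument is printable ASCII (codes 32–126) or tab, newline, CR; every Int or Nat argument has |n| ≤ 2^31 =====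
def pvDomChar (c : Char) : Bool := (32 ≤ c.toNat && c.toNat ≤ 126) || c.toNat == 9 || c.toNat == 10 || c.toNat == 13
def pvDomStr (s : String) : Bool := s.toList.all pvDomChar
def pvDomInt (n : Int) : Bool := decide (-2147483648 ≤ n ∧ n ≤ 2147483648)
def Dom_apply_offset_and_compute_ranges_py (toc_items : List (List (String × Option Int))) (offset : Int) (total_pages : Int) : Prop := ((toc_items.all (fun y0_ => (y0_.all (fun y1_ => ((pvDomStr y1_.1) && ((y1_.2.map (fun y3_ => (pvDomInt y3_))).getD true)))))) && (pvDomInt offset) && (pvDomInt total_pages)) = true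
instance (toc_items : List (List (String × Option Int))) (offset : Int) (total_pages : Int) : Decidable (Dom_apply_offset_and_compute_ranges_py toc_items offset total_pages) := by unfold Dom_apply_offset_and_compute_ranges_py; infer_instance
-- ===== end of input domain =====

-- B replaces A's three passes with a per-item inner scan by one forward fill pass and one
-- backward monotonic-stack pass (next-greater-element), avoiding the worst-case quadratic scan
-- (measured about 1.3x on random inputs, not confirmed >= 1.5x). Both Pythons mutate the item
-- dicts in place and return the same list object; the equivalence proved is about the RETURN value.

-- ===== PORT A =====
-- shared dict primitives: item.get(k) (None if absent or stored None) and item[k] = v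
def pvGet (d : List (String × Option Int)) (k : String) : Option Int :=
  ((PySem.Dict.mk d).get? k).getD none
def pvSet (d : List (String × Option Int)) (k : String) (v : Option Int) : List (String × Option Int) :=
  ((PySem.Dict.mk d).insert k v).items

-- loop 1: item["physical_index"] = item["page"] + offset  (or None)
def pvPhase1A (offset : Int) (l : List (List (String × Option Int))) : List (List (String × Option Int)) :=
  l.map (fun d =>
    match pvGet d "page" with
    | some v => pvSet d "physical_index" (some (v + offset))
    | none => pvSet d "physical_index" none)

-- loop 2: forward-fill, threading last_valid
-- (item["physical_index"] is always present here — loop 1 set it — so the pvGet read is exact)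
def pvFillA (last : Int) : List (List (String × Option Int)) → List (List (String × Option Int))
  | [] => []
  | d :: rest =>
    match pvGet d "physical_index" with
    | some v =>
      if v ≥ 1 then d :: pvFillA v rest
      else pvSet d "physical_index" (some last) :: pvFillA last rest
    | none => pvSet d "physical_index" (some last) :: pvFillA last rest

-- inner scan of loop 3: first later ns with (ns truthy and ns > start), minus 1; else total
def pvScanA (start total : Int) : List (List (String × Option Int)) → Int
  | [] => total
  | d :: rest =>
    match pvGet d "physical_index" with
    | some v => if v ≠ 0 ∧ v > start then v - 1 else pvScanA start total rest
    | none => pvScanA start total rest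

-- loop 3: set start_index / end_index (physical_index is always a some-int here; getD 0 reads it)
def pvPhase3A (total : Int) : List (List (String × Option Int)) → List (List (String × Option Int))
  | [] => []
  | d :: rest =>
    let pi := pvGet d "physical_index"
    let s := pi.getD 0
    let d1 := pvSet d "start_index" pi
    let ns := pvScanA s total rest
    let e := min ns total
    let e' := if e < s then s else e
    pvSet d1 "end_index" (some e') :: pvPhase3A total rest

def apply_offset_and_compute_ranges_py (toc_items : List (List (String × Option Int))) (offset : Int) (total_pages : Int) : List (List (String × Option Int)) :=
  pvPhase3A total_pages (pvFillA 1 (pvPhase1A offset toc_items))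

-- ===== PORT B =====
-- forward pass: offset + forward-fill, producing the physical indices
def pvPhysB (last offset : Int) : List (List (String × Option Int)) → List Int
  | [] => []
  | d :: rest =>
    match pvGet d "page" with
    | some v =>
      let p := v + offset
      if p < 1 then last :: pvPhysB last offset rest else p :: pvPhysB p offset rest
    | none => last :: pvPhysB last offset rest

-- backward pass (Python's for i in range(n-1,-1,-1)): returns (ends, monotonic stack)
def pvEndsB (total : Int) : List Int → List Int × List Int
  | [] => ([], [])
  | p :: rest =>
    let (ends, stk) := pvEndsB total rest
    let stk' := stk.dropWhile (· ≤ p)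
    let e0 := match stk'.head? with
      | some q => min (q - 1) total
      | none => total
    let e := if e0 < p then p else e0
    (e :: ends, p :: stk')

-- final zip: write the three keys into each item
def pvZipB : List (List (String × Option Int)) → List Int → List Int → List (List (String × Option Int))
  | d :: l, p :: ps, e :: es =>
    pvSet (pvSet (pvSet d "physical_index" (some p)) "start_index" (some p)) "end_index" (some e)
      :: pvZipB l ps es
  | _, _, _ => []

def apply_offset_and_compute_ranges_py_alt (toc_items : List (List (String × Option Int))) (offset : Int) (total_pages : Int) : List (List (String × Option Int)) :=
  let phys := pvPhysB 1 offset toc_items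
  let ends := (pvEndsB total_pages phys).1
  pvZipB toc_items phys ends

-- ===== PRECONDITION & SPEC =====
def Spec_apply_offset_and_compute_ranges_py (toc_items : List (List (String × Option Int))) (offset : Int) (total_pages : Int) (out : List (List (String × Option Int))) : Prop := out = apply_offset_and_compute_ranges_py_alt toc_items offset total_pages
instance (toc_items : List (List (String × Option Int))) (offset : Int) (total_pages : Int) (out : List (List (String × Option Int))) : Decidable (Spec_apply_offset_and_compute_ranges_py toc_items offset total_pages out) := by unfold Spec_apply_offset_and_compute_ranges_py; infer_instance

-- ===== CLAIM (what is proved, stated in full; the proofs are below) =====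
def Claim_equal_apply_offset_and_compute_ranges_py : Prop := ∀ (toc_items : List (List (String × Option Int))) (offset : Int) (total_pages : Int), Dom_apply_offset_and_compute_ranges_py toc_items offset total_pages → Spec_apply_offset_and_compute_ranges_py toc_items offset total_pages (apply_offset_and_compute_ranges_py toc_items offset total_pages)

-- ===== LEMMAS AND PROOFS =====

-- "set physical_index", the shape both sides share after A's loops 1+2
def pvSetPhys (d : List (String × Option Int)) (p : Int) : List (String × Option Int) :=
  pvSet d "physical_index" (some p)

lemma pvGet_pvSet_self (d : List (String × Option Int)) (k : String) (v : Option Int) :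
    pvGet (pvSet d k v) k = v := by
  unfold pvGet pvSet
  rw [show (PySem.Dict.mk ((PySem.Dict.mk d).insert k v).items) = (PySem.Dict.mk d).insert k v from rfl]
  rw [PySem.Dict.get?_insert_self]; rfl

lemma pvSet_pvSet_self (d : List (String × Option Int)) (k : String) (v w : Option Int) :
    pvSet (pvSet d k v) k w = pvSet d k w := by
  unfold pvSet
  rw [show (PySem.Dict.mk ((PySem.Dict.mk d).insert k v).items) = (PySem.Dict.mk d).insert k v from rfl]
  rw [PySem.Dict.insert_insert_self]

lemma pvGet_setPhys (d : List (String × Option Int)) (p : Int) :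
    pvGet (pvSetPhys d p) "physical_index" = some p := pvGet_pvSet_self ..

-- A's loops 1+2 equal B's single fill pass
lemma fill_eq_phys (l : List (List (String × Option Int))) (last offset : Int) :
    pvFillA last (pvPhase1A offset l)
      = List.zipWith pvSetPhys l (pvPhysB last offset l) := by
  induction l generalizing last with
  | nil => rfl
  | cons d rest ih =>
    simp only [pvPhase1A, List.map_cons, pvPhysB]
    cases hpage : pvGet d "page" with
    | some v =>
      simp only [pvFillA, pvGet_pvSet_self]
      by_cases hp : v + offset < 1
      · have : ¬ (v + offset ≥ 1) := by omega
        simp only [this, if_pos hp, pvSet_pvSet_self, List.zipWith_cons_cons]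
        exact List.cons_eq_cons.mpr ⟨rfl, by simpa [pvPhase1A] using ih last⟩
      · have h1 : v + offset ≥ 1 := by omega
        simp only [if_pos h1, if_neg hp, List.zipWith_cons_cons, pvSetPhys]
        exact List.cons_eq_cons.mpr ⟨rfl, by simpa [pvPhase1A] using ih (v + offset)⟩
    | none =>
      simp only [pvFillA, pvGet_pvSet_self, pvSet_pvSet_self, List.zipWith_cons_cons, pvSetPhys]
      exact List.cons_eq_cons.mpr ⟨rfl, by simpa [pvPhase1A] using ih last⟩

lemma phys_ge_one (l : List (List (String × Option Int))) (last offset : Int)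
    (h : 1 ≤ last) : ∀ p ∈ pvPhysB last offset l, 1 ≤ p := by
  induction l generalizing last with
  | nil => simp [pvPhysB]
  | cons d rest ih =>
    intro p hp
    simp only [pvPhysB] at hp
    cases hpage : pvGet d "page" with
    | some v =>
      rw [hpage] at hp
      by_cases hlt : v + offset < 1
      · simp only [if_pos hlt, List.mem_cons] at hp
        rcases hp with rfl | hp; · exact h
        exact ih last h p hp
      · simp only [if_neg hlt, List.mem_cons] at hp
        rcases hp with rfl | hp; · omega
        exact ih (v + offset) (by omega) p hp
    | none =>
      rw [hpage] at hp
      rcases List.mem_cons.mp hp with rfl | hp; · exact h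
      exact ih last h p hp

lemma length_phys (l : List (List (String × Option Int))) (last offset : Int) :
    (pvPhysB last offset l).length = l.length := by
  induction l generalizing last with
  | nil => rfl
  | cons d rest ih =>
    simp only [pvPhysB]
    cases pvGet d "page" with
    | some v => by_cases h : v + offset < 1 <;> simp [h, ih]
    | none => simp [ih]

-- a dropWhile after a dropWhile with a weaker predicate
lemma dropWhile_dropWhile (x : List Int) (p s : Int) (h : p ≤ s) :
    (x.dropWhile (· ≤ p)).dropWhile (· ≤ s) = x.dropWhile (· ≤ s) := by
  induction x with
  | nil => rfl
  | cons a t ih =>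
    by_cases hp : a ≤ p
    · have hs : a ≤ s := le_trans hp h
      simp [hp, hs, ih]
    · simp [List.dropWhile_cons, hp]

-- the stack component of the backward pass
def pvChain : List Int → List Int
  | [] => []
  | p :: rest => p :: (pvChain rest).dropWhile (· ≤ p)

lemma ends_snd (total : Int) (l : List Int) : (pvEndsB total l).2 = pvChain l := by
  induction l with
  | nil => rfl
  | cons p rest ih => simp [pvEndsB, pvChain, ih]

-- NGE core: popping the stack finds the first strictly greater later value
lemma chain_head (l : List Int) (s : Int) :
    ((pvChain l).dropWhile (· ≤ s)).head? = l.find? (fun q => decide (s < q)) := by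
  induction l with
  | nil => rfl
  | cons p rest ih =>
    by_cases hp : p ≤ s
    · have : ¬ (s < p) := by omega
      simp [pvChain, hp, this, dropWhile_dropWhile _ _ _ hp, ih]
    · have : s < p := by omega
      simp [pvChain, List.dropWhile_cons, hp, this]

-- A's inner scan over the filled list is first-greater on the physical indices
lemma scan_eq_find (l : List (List (String × Option Int))) (ps : List Int) (s total : Int)
    (hlen : l.length = ps.length) (hs : 1 ≤ s) :
    pvScanA s total (List.zipWith pvSetPhys l ps)
      = (match ps.find? (fun q => decide (s < q)) with
         | some q => q - 1
         | none => total) := by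
  induction l generalizing ps with
  | nil => cases ps with
    | nil => rfl
    | cons p pt => simp at hlen
  | cons d lt ih =>
    cases ps with
    | nil => simp at hlen
    | cons p pt =>
      simp only [List.zipWith_cons_cons, pvScanA, pvGet_setPhys, List.find?_cons]
      by_cases hsp : s < p
      · have hc : p ≠ 0 ∧ p > s := by constructor <;> omega
        simp [hc]
      · have hc : ¬ (p ≠ 0 ∧ p > s) := by omega
        simp only [if_neg hc, hsp, decide_false]
        simpa using ih pt (by simpa using hlen)

lemma phase3_eq_zip (l : List (List (String × Option Int))) (ps : List Int) (total : Int)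
    (hlen : l.length = ps.length) (hps : ∀ p ∈ ps, 1 ≤ p) :
    pvPhase3A total (List.zipWith pvSetPhys l ps)
      = pvZipB l ps (pvEndsB total ps).1 := by
  induction l generalizing ps with
  | nil => cases ps with
    | nil => rfl
    | cons p pt => simp at hlen
  | cons d lt ih =>
    cases ps with
    | nil => simp at hlen
    | cons p pt =>
      have hp : 1 ≤ p := hps p (by simp)
      have hpt : ∀ q ∈ pt, 1 ≤ q := fun q hq => hps q (by simp [hq])
      simp only [List.zipWith_cons_cons, pvPhase3A, pvGet_setPhys, pvEndsB, pvZipB,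
        Option.getD_some]
      rw [scan_eq_find lt pt p total (by simpa using hlen) hp]
      rw [ends_snd, chain_head]
      refine List.cons_eq_cons.mpr ⟨?_, ih pt (by simpa using hlen) hpt⟩
      simp only [pvSetPhys]
      cases hfind : pt.find? (fun q => decide (p < q)) with
      | some q => simp [hfind]
      | none => simp [hfind]

-- ===== VERDICT (by name: the statement is the Claim_ definition above) =====
theorem apply_offset_and_compute_ranges_py_spec : Claim_equal_apply_offset_and_compute_ranges_py := by
  intro toc_items offset total_pages _
  unfold Spec_apply_offset_and_compute_ranges_py
  unfold apply_offset_and_compute_ranges_py apply_offset_and_compute_ranges_py_alt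
  rw [fill_eq_phys, phase3_eq_zip]
  · exact (length_phys ..).symm
  · exact phys_ge_one _ _ _ (le_refl 1)
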